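-- pv_equiv track=rewrite | github.com/Danpun9/Baekjoon | Python/백준/Silver/6576. 쿼드 트리/쿼드 트리.py | decode_quadtree
-- ===== SOURCE A (Python) =====
-- def decode_quadtree(s, size):
--     def parse(s, index, x, y, size, grid):
--         if s[index[0]] == "B":
--             for i in range(size):
--                 for j in range(size):
--                     grid[y + i][x + j] = 1
--             index[0] += 1
--         elif s[index[0]] == "W":
--             for i in range(size):
--                 for j in range(size):
--                     grid[y + i][x + j] = 0
--             index[0] += 1
--         elif s[index[0]] == "Q":
--             index[0] += 1
--             half = size // 2
--             parse(s, index, x, y, half, grid)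
--             parse(s, index, x + half, y, half, grid)
--             parse(s, index, x, y + half, half, grid)
--             parse(s, index, x + half, y + half, half, grid)
--
--     grid = [[0] * size for _ in range(size)]
--     index = [0]
--     parse(s, index, 0, 0, size, grid)
--     return grid
-- ===== SOURCE B (Python) =====
-- def decode_quadtree(s, size):
--     grid = [[0] * size for _ in range(size)]
--     stack = [(0, 0, size)]
--     i = 0
--     while stack:
--         x, y, sz = stack.pop()
--         c = s[i]
--         if c == "Q":
--             i += 1
--             half = sz // 2
--             stack.append((x + half, y + half, half))
--             stack.append((x, y + half, half))
--             stack.append((x + half, y, half))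
--             stack.append((x, y, half))
--         elif c == "B" or c == "W":
--             i += 1
--             v = 1 if c == "B" else 0
--             for r in range(sz):
--                 for col in range(sz):
--                     grid[y + r][x + col] = v
--     return grid
-- ===== Notes on version B (the rewrite author's own statement) =====
-- stated objective: alternative
-- what changed: Replaced the recursive pre-order parser mutating a shared index cell with an iterative explicit-stack traversal (regions pushed in reverse so the string is consumed in the same order), and merged the two fill branches into one with a value variable.
import Mathlib
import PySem

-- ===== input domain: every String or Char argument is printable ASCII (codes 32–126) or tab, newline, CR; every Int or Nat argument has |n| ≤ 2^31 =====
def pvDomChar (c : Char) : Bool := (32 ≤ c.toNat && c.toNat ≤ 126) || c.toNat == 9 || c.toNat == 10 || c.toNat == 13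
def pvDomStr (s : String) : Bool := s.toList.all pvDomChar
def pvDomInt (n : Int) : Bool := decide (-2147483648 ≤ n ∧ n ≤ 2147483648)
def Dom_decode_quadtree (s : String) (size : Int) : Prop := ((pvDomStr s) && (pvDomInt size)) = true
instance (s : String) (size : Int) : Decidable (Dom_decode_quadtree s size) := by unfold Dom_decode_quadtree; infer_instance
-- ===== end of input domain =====

-- B re-implements A's recursive quadtree parser as an iterative explicit-stack traversal (same
-- string consumption order, same grid); return values proved equal wherever A returns (Pre_).

-- grid[r][c] = v  (indices are always in range when the Python executes this; see the fills' geometry)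
def pvSet2 (grid : List (List Int)) (r c : Int) (v : Int) : List (List Int) :=
  grid.modify r.toNat (fun row => row.set c.toNat v)

-- [[0]*size for _ in range(size)]
def pvGrid0 (size : Int) : List (List Int) :=
  (PySem.List.pyRange 0 size 1).map (fun _ => List.replicate size.toNat (0 : Int))

-- ===== PORT A =====
-- the nested 'for i in range(size): for j in range(size): grid[y+i][x+j] = v' fill (A writes it twice, with v = 1 and v = 0)
def pvFill (grid : List (List Int)) (x y : Int) (size : Int) (v : Int) : List (List Int) :=
  (PySem.List.pyRange 0 size 1).foldl (fun g i =>
    (PySem.List.pyRange 0 size 1).foldl (fun g j => pvSet2 g (y + i) (x + j) v) g) grid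

-- A's 'parse', index cell threaded as a Nat; fuel only makes the recursion structural
-- (recursion depth ≤ chars consumed + 1, so fuel = len+1 never runs out when the Python returns);
-- 'none' from s[i]? is Python's IndexError, excluded by Pre_.
def pvParseA (s : List Char) : Nat → Nat → Int → Int → Int → List (List Int) → Nat × List (List Int)
  | 0, i, _, _, _, grid => (i, grid)
  | fuel + 1, i, x, y, size, grid =>
    match s[i]? with
    | none => (i, grid)
    | some c =>
      if c = 'B' then (i + 1, pvFill grid x y size 1)
      else if c = 'W' then (i + 1, pvFill grid x y size 0)
      else if c = 'Q' then
        let half := PySem.Int.floordiv size 2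
        let r1 := pvParseA s fuel (i + 1) x y half grid
        let r2 := pvParseA s fuel r1.1 (x + half) y half r1.2
        let r3 := pvParseA s fuel r2.1 x (y + half) half r2.2
        pvParseA s fuel r3.1 (x + half) (y + half) half r3.2
      else (i, grid)

def decode_quadtree (s : String) (size : Int) : List (List Int) :=
  (pvParseA s.toList (s.toList.length + 1) 0 0 0 size (pvGrid0 size)).2

def pvLoopB (s : List Char) : List (Int × Int × Int) → Nat → List (List Int) → List (List Int)
  | [], _, grid => grid
  | (x, y, sz) :: st, i, grid =>
    match h : s[i]? with
    | none => grid
    | some c =>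
      if c = 'Q' then
        let half := PySem.Int.floordiv sz 2
        pvLoopB s ((x, y, half) :: (x + half, y, half) :: (x, y + half, half) ::
                   (x + half, y + half, half) :: st) (i + 1) grid
      else if c = 'B' ∨ c = 'W' then
        pvLoopB s st (i + 1) (pvFill grid x y sz (if c = 'B' then 1 else 0))
      else pvLoopB s st i grid
termination_by st i _ => 4 * (s.length - i) + st.length
decreasing_by
  · have hi : i < s.length := (List.getElem?_eq_some_iff.mp h).1
    simp; omega
  · have hi : i < s.length := (List.getElem?_eq_some_iff.mp h).1
    simp; omega
  · simp

def decode_quadtree_alt (s : String) (size : Int) : List (List Int) :=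
  pvLoopB s.toList [(0, 0, size)] 0 (pvGrid0 size)

-- ===== PRECONDITION & SPEC =====
-- Pre_ excludes exactly the inputs on which A raises IndexError (and B raises there too, so
-- nothing A returns on is excluded). Closed form: decoding fails iff every character of s is one
-- of 'B','W','Q' AND no prefix of s is a complete tree, i.e. no k with k = 1 + 4*(number of 'Q'
-- among the first k characters) — each 'Q' adds four regions to decode, each other character
-- closes one (a character outside B/W/Q ends every remaining region at once, since A's parse
-- returns without advancing the index on it).
def pvBWQ (c : Char) : Bool := c == 'B' || c == 'W' || c == 'Q'
def pvWf (t : List Char) (n : Nat) : Bool :=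
  t.any (fun c => !pvBWQ c) ||
    (List.range (t.length + 1)).any (fun k => k == n + 4 * ((t.take k).count 'Q'))
def Pre_decode_quadtree (s : String) (size : Int) : Prop := pvWf s.toList 1 = true
instance (s : String) (size : Int) : Decidable (Pre_decode_quadtree s size) := by
  unfold Pre_decode_quadtree; infer_instance

def pvWitness_decode_quadtree : String × Int := ("QBWBW", 2)

def Spec_decode_quadtree (s : String) (size : Int) (out : List (List Int)) : Prop := out = decode_quadtree_alt s size
instance (s : String) (size : Int) (out : List (List Int)) : Decidable (Spec_decode_quadtree s size out) := by unfold Spec_decode_quadtree; infer_instance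

-- ===== CLAIM (what is proved, stated in full; the proofs are below) =====
def Claim_equal_decode_quadtree : Prop := ∀ (s : String) (size : Int), Dom_decode_quadtree s size → Pre_decode_quadtree s size → Spec_decode_quadtree s size (decode_quadtree s size)

-- ===== LEMMAS AND PROOFS =====

-- success of A's reads, as an automaton over the string: position i, n regions pending
-- pvOk s i n: starting at position i of s with n regions still to decode, every character read is
-- in range (a 'Q' adds three pending regions, 'B'/'W' consume one, any other character ends a
-- region without consuming a character). This is the input grammar, tracking only a position and a
-- pending-region count — not a copy of either port (no grid, no geometry).
def pvOk (s : List Char) : Nat → Nat → Bool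
  | _, 0 => true
  | i, n + 1 =>
    match h : s[i]? with
    | none => false
    | some c =>
      if c = 'Q' then pvOk s (i + 1) (n + 4)
      else if c = 'B' ∨ c = 'W' then pvOk s (i + 1) n
      else pvOk s i n
termination_by i n => 4 * (s.length - i) + n
decreasing_by
  · have hi : i < s.length := (List.getElem?_eq_some_iff.mp h).1
    omega
  · have hi : i < s.length := (List.getElem?_eq_some_iff.mp h).1
    omega
  · omega


-- propositional reading of the closed-form precondition
theorem pvWf_prop (t : List Char) (n : Nat) :
    pvWf t n = true ↔
      ((∃ c ∈ t, pvBWQ c = false) ∨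
        (∃ k, k ≤ t.length ∧ k = n + 4 * ((t.take k).count 'Q'))) := by
  simp [pvWf, List.any_eq_true]

-- the closed-form precondition implies the automaton succeeds
theorem pvWf_ok (l : List Char) :
    ∀ (M i n : Nat), 4 * (l.length - i) + n ≤ M →
      pvWf (l.drop i) n = true → pvOk l i n = true := by
  intro M
  induction M with
  | zero =>
    intro i n hM hw
    have hn : n = 0 := by omega
    subst hn; rw [pvOk]
  | succ M ih =>
    intro i n hM hw
    match n with
    | 0 => rw [pvOk]
    | n + 1 =>
      rw [pvOk]
      cases h : l[i]? with
      | none =>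
        exfalso
        have hi : l.length ≤ i := List.getElem?_eq_none_iff.mp h
        have ht : l.drop i = [] := List.drop_eq_nil_of_le hi
        rw [ht, pvWf_prop] at hw
        rcases hw with ⟨c, hc, _⟩ | ⟨k, hk, he⟩
        · simp at hc
        · simp at hk; omega
      | some c =>
        obtain ⟨hi, hget⟩ := List.getElem?_eq_some_iff.mp h
        have ht : l.drop i = c :: l.drop (i + 1) := by
          rw [List.drop_eq_getElem_cons hi, hget]
        rw [ht, pvWf_prop] at hw
        simp only [List.getElem?_eq_some_iff]
        by_cases hQ : c = 'Q'
        · subst hQ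
          rw [if_pos rfl]
          apply ih (i + 1) (n + 4) (by omega)
          rw [pvWf_prop]
          rcases hw with ⟨d, hd, hdf⟩ | ⟨k, hk, he⟩
          · rcases List.mem_cons.mp hd with rfl | hd'
            · simp [pvBWQ] at hdf
            · exact Or.inl ⟨d, hd', hdf⟩
          · obtain ⟨k', rfl⟩ : ∃ k', k = k' + 1 := ⟨k - 1, by omega⟩
            rw [List.take_succ_cons, List.count_cons] at he
            simp only [List.length_cons] at hk
            exact Or.inr ⟨k', by omega, by simp at he; omega⟩
        by_cases hBW : c = 'B' ∨ c = 'W'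
        · rw [if_neg hQ, if_pos hBW]
          apply ih (i + 1) n (by omega)
          rw [pvWf_prop]
          have hcB : pvBWQ c = true := by
            rcases hBW with rfl | rfl <;> decide
          rcases hw with ⟨d, hd, hdf⟩ | ⟨k, hk, he⟩
          · rcases List.mem_cons.mp hd with rfl | hd'
            · rw [hcB] at hdf; exact absurd hdf (by decide)
            · exact Or.inl ⟨d, hd', hdf⟩
          · obtain ⟨k', rfl⟩ : ∃ k', k = k' + 1 := ⟨k - 1, by omega⟩
            rw [List.take_succ_cons, List.count_cons] at he
            simp only [List.length_cons] at hk
            exact Or.inr ⟨k', by omega, by simp [hQ] at he; omega⟩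
        · rw [if_neg hQ, if_neg hBW]
          apply ih i n (by omega)
          rw [pvWf_prop, ht]
          refine Or.inl ⟨c, List.mem_cons_self .., ?_⟩
          simp only [pvBWQ, Bool.or_eq_false_iff, beq_eq_false_iff_ne]
          exact ⟨⟨fun h' => hBW (Or.inl h'), fun h' => hBW (Or.inr h')⟩, hQ⟩


-- A's parse never moves the index backwards.
theorem pvParseA_mono (s : List Char) :
    ∀ (fuel i : Nat) (x y sz : Int) (g : List (List Int)),
      i ≤ (pvParseA s fuel i x y sz g).1 := by
  intro fuel
  induction fuel with
  | zero => intro i x y sz g; simp [pvParseA]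
  | succ m ih =>
    intro i x y sz g
    rw [pvParseA]
    cases h : s[i]? with
    | none => simp
    | some c =>
      simp only
      by_cases hB : c = 'B'
      · simp [hB]
      by_cases hW : c = 'W'
      · simp [hW]
      by_cases hQ : c = 'Q'
      · subst hQ
        rw [if_neg (show ¬('Q' : Char) = 'B' by decide), if_neg (show ¬('Q' : Char) = 'W' by decide),
           if_pos rfl]
        rcases e1 : pvParseA s m (i + 1) x y (PySem.Int.floordiv sz 2) g with ⟨i1, g1⟩
        have h1 := ih (i + 1) x y (PySem.Int.floordiv sz 2) g
        rw [e1] at h1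
        simp only
        rcases e2 : pvParseA s m i1 (x + PySem.Int.floordiv sz 2) y (PySem.Int.floordiv sz 2) g1 with ⟨i2, g2⟩
        have h2 := ih i1 (x + PySem.Int.floordiv sz 2) y (PySem.Int.floordiv sz 2) g1
        rw [e2] at h2
        simp only
        rcases e3 : pvParseA s m i2 x (y + PySem.Int.floordiv sz 2) (PySem.Int.floordiv sz 2) g2 with ⟨i3, g3⟩
        have h3 := ih i2 x (y + PySem.Int.floordiv sz 2) (PySem.Int.floordiv sz 2) g2
        rw [e3] at h3
        simp only
        have h4 := ih i3 (x + PySem.Int.floordiv sz 2) (y + PySem.Int.floordiv sz 2) (PySem.Int.floordiv sz 2) g3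
        simp only at h1 h2 h3
        omega
      · simp [hB, hW, hQ]

-- KEY: running B's loop on a region pushed on the stack equals running A's parse on that region
-- and continuing with the rest of the stack; pvOk is maintained with one fewer pending region.
theorem pvStep (s : List Char) :
    ∀ (fuel : Nat) (i : Nat) (x y sz : Int) (g : List (List Int))
      (st : List (Int × Int × Int)) (n : Nat),
      s.length - i < fuel → pvOk s i (n + 1) = true →
      pvLoopB s ((x, y, sz) :: st) i g =
        pvLoopB s st (pvParseA s fuel i x y sz g).1 (pvParseA s fuel i x y sz g).2
      ∧ pvOk s (pvParseA s fuel i x y sz g).1 n = true := by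
  intro fuel
  induction fuel with
  | zero => intro i x y sz g st n hf _; omega
  | succ m ih =>
    intro i x y sz g st n hf hok
    rw [pvOk] at hok
    rw [pvParseA, pvLoopB]
    cases h : s[i]? with
    | none => rw [h] at hok; simp at hok
    | some c =>
      rw [h] at hok
      have hi : i < s.length := (List.getElem?_eq_some_iff.mp h).1
      simp only
      by_cases hQ : c = 'Q'
      · subst hQ
        rw [if_neg (show ¬('Q' : Char) = 'B' by decide), if_neg (show ¬('Q' : Char) = 'W' by decide),
           if_pos rfl]
        rw [if_pos rfl]
        simp only [if_true] at hok
        -- hok : pvOk s (i + 1) (n + 4) = true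
        rcases e1 : pvParseA s m (i + 1) x y (PySem.Int.floordiv sz 2) g with ⟨i1, g1⟩
        have m1 := pvParseA_mono s m (i + 1) x y (PySem.Int.floordiv sz 2) g
        rw [e1] at m1
        have s1 := ih (i + 1) x y (PySem.Int.floordiv sz 2) g
          ((x + PySem.Int.floordiv sz 2, y, PySem.Int.floordiv sz 2) ::
           (x, y + PySem.Int.floordiv sz 2, PySem.Int.floordiv sz 2) ::
           (x + PySem.Int.floordiv sz 2, y + PySem.Int.floordiv sz 2, PySem.Int.floordiv sz 2) :: st)
          (n + 3) (by omega) (by simpa using hok)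
        rw [e1] at s1
        rcases e2 : pvParseA s m i1 (x + PySem.Int.floordiv sz 2) y (PySem.Int.floordiv sz 2) g1 with ⟨i2, g2⟩
        have m2 := pvParseA_mono s m i1 (x + PySem.Int.floordiv sz 2) y (PySem.Int.floordiv sz 2) g1
        rw [e2] at m2
        have s2 := ih i1 (x + PySem.Int.floordiv sz 2) y (PySem.Int.floordiv sz 2) g1
          ((x, y + PySem.Int.floordiv sz 2, PySem.Int.floordiv sz 2) ::
           (x + PySem.Int.floordiv sz 2, y + PySem.Int.floordiv sz 2, PySem.Int.floordiv sz 2) :: st)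
          (n + 2) (by omega) (by simpa using s1.2)
        rw [e2] at s2
        rcases e3 : pvParseA s m i2 x (y + PySem.Int.floordiv sz 2) (PySem.Int.floordiv sz 2) g2 with ⟨i3, g3⟩
        have m3 := pvParseA_mono s m i2 x (y + PySem.Int.floordiv sz 2) (PySem.Int.floordiv sz 2) g2
        rw [e3] at m3
        have s3 := ih i2 x (y + PySem.Int.floordiv sz 2) (PySem.Int.floordiv sz 2) g2
          ((x + PySem.Int.floordiv sz 2, y + PySem.Int.floordiv sz 2, PySem.Int.floordiv sz 2) :: st)
          (n + 1) (by omega) (by simpa using s2.2)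
        rw [e3] at s3
        have s4 := ih i3 (x + PySem.Int.floordiv sz 2) (y + PySem.Int.floordiv sz 2) (PySem.Int.floordiv sz 2) g3
          st n (by omega) (by simpa using s3.2)
        exact ⟨by rw [s1.1, s2.1, s3.1, s4.1]; simp, s4.2⟩
      by_cases hB : c = 'B'
      · subst hB
        exact ⟨by simp, by simpa using hok⟩
      by_cases hW : c = 'W'
      · subst hW
        exact ⟨by simp, by simpa using hok⟩
      · exact ⟨by simp [hB, hW, hQ], by simpa [hQ, hB, hW] using hok⟩

-- ===== VERDICT (by name: the statement is the Claim_ definition above) =====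
theorem decode_quadtree_spec : Claim_equal_decode_quadtree := by
  intro s size _ hpre
  unfold Spec_decode_quadtree decode_quadtree decode_quadtree_alt
  have hok : pvOk s.toList 0 1 = true :=
    pvWf_ok s.toList (4 * s.toList.length + 1) 0 1 (by omega) (by simpa using hpre)
  have h := pvStep s.toList (s.toList.length + 1) 0 0 0 size (pvGrid0 size) [] 0
    (by omega) hok
  rw [h.1, pvLoopB]
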